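-- pv_equiv track=rewrite | github.com/27kanghan/codetree-TILs | 260422/흥미로운 숫자 2/interesting-numbers-2.py | get_interesting_number
-- ===== SOURCE A (Python) =====
-- def get_interesting_number(num) :
--     s = str(num)
--
--     unique_digits = set(s)
--     if(len(unique_digits) != 2) :
--         return False
--
--     for d in unique_digits:
--         if s.count(d) == 1:
--             return True
--
--     return False
-- ===== SOURCE B (Python) =====
-- def get_interesting_number(num):
--     # Single left-to-right pass with two registers: the first two distinct
--     # characters seen and their running counts; a third distinct character
--     # aborts immediately. Correct because "interesting" only depends on
--     # having exactly two distinct characters and one of their counts being 1.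
--     a = b = None
--     ca = cb = 0
--     for ch in str(num):
--         if ch == a:
--             ca += 1
--         elif ch == b:
--             cb += 1
--         elif a is None:
--             a, ca = ch, 1
--         elif b is None:
--             b, cb = ch, 1
--         else:
--             return False
--     return b is not None and (ca == 1 or cb == 1)
-- ===== Notes on version B (the rewrite author's own statement) =====
-- stated objective: alternative
-- what changed: Replaces A's set construction plus per-distinct-character count rescans by a single left-to-right streaming pass that keeps two registers (the first two distinct characters and their running counts) and aborts as soon as a third distinct character appears.
import Mathlib
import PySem

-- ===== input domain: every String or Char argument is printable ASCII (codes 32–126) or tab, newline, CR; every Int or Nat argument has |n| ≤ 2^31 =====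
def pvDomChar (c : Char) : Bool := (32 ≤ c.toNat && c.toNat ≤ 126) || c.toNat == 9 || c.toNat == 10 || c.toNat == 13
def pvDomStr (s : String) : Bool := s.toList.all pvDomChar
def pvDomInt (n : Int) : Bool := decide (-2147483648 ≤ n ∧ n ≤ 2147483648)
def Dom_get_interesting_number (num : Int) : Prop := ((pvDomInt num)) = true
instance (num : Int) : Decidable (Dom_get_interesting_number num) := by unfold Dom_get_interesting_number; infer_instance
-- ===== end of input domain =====

-- B replaces the set build + per-distinct-char count rescans by one streaming pass with two
-- (char, count) registers and early exit on a third distinct character (alternative algorithm).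

-- ===== PORT A =====
-- s.count(d) with d a single character equals the character count (exact for length-1 substrings)
def get_interesting_number (num : Int) : Bool :=
  let s := PySem.Int.toChars num
  let unique_digits : PySem.Set Char := PySem.Set.ofList s
  if PySem.Set.len unique_digits ≠ 2 then false
  else unique_digits.any (fun d => s.count d == 1)

-- ===== PORT B =====
-- the for-loop with early 'return False' becomes structural recursion over the remaining chars
def giLoop : List Char → Option Char → Int → Option Char → Int → Bool
  | [], _, ca, b, cb => b.isSome && (ca == 1 || cb == 1)
  | ch :: rest, a, ca, b, cb =>
    if some ch == a then giLoop rest a (ca + 1) b cb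
    else if some ch == b then giLoop rest a ca b (cb + 1)
    else if a == none then giLoop rest (some ch) 1 b cb
    else if b == none then giLoop rest a ca (some ch) 1
    else false

def get_interesting_number_alt (num : Int) : Bool :=
  giLoop (PySem.Int.toChars num) none 0 none 0

-- ===== PRECONDITION & SPEC =====
def Spec_get_interesting_number (num : Int) (out : Bool) : Prop := out = get_interesting_number_alt num
instance (num : Int) (out : Bool) : Decidable (Spec_get_interesting_number num out) := by unfold Spec_get_interesting_number; infer_instance

-- ===== CLAIM (what is proved, stated in full; the proofs are below) =====
def Claim_equal_get_interesting_number : Prop := ∀ (num : Int), Dom_get_interesting_number num → Spec_get_interesting_number num (get_interesting_number num)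

-- ===== LEMMAS AND PROOFS =====

-- A's body as a function of the character list
def giA (s : List Char) : Bool :=
  if PySem.Set.len (PySem.Set.ofList s) ≠ 2 then false
  else (PySem.Set.ofList s).any (fun d => s.count d == 1)

theorem giA_of_three {s : List Char} {x y z : Char}
    (hx : x ∈ s) (hy : y ∈ s) (hz : z ∈ s)
    (hxy : x ≠ y) (hxz : x ≠ z) (hyz : y ≠ z) : giA s = false := by
  have hsub : ({x, y, z} : Finset Char) ⊆ (PySem.Set.ofList s).toFinset := by
    intro w hw
    simp only [Finset.mem_insert, Finset.mem_singleton] at hw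
    rcases hw with rfl | rfl | rfl <;>
      simp [List.mem_toFinset, PySem.Set.mem_ofList, hx, hy, hz]
  have hcard : ({x, y, z} : Finset Char).card = 3 := by
    rw [Finset.card_insert_of_notMem (by simp [hxy, hxz]),
        Finset.card_insert_of_notMem (by simp [hyz]), Finset.card_singleton]
  have h3 : 3 ≤ (PySem.Set.ofList s).length := by
    have := Finset.card_le_card hsub
    rwa [hcard, List.toFinset_card_of_nodup (PySem.Set.nodup_ofList s)] at this
  have hne : PySem.Set.len (PySem.Set.ofList s) ≠ 2 := by
    simp only [PySem.Set.len]
    omega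
  unfold giA
  exact if_pos hne

theorem natCast_beq_one (n : Nat) : ((n : Int) == 1) = (n == 1) := by
  by_cases h : n = 1
  · subst h; rfl
  · have h' : (n : Int) ≠ 1 := by exact_mod_cast h
    simp [h, h']

theorem giLoop_inv : ∀ (cs p : List Char) (a : Option Char) (ca : Int) (b : Option Char) (cb : Int),
    ((PySem.Set.ofList p = [] ∧ a = none ∧ ca = 0 ∧ b = none ∧ cb = 0) ∨
     (∃ x, PySem.Set.ofList p = [x] ∧ a = some x ∧ ca = (p.count x : Int) ∧ b = none ∧ cb = 0) ∨
     (∃ x y, PySem.Set.ofList p = [x, y] ∧ a = some x ∧ ca = (p.count x : Int) ∧ b = some y ∧ cb = (p.count y : Int))) →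
    giLoop cs a ca b cb = giA (p ++ cs) := by
  intro cs
  induction cs with
  | nil =>
    intro p a ca b cb H
    rcases H with ⟨h0, ha, hca, hb, hcb⟩ | ⟨x, hS, ha, hca, hb, hcb⟩ | ⟨x, y, hS, ha, hca, hb, hcb⟩ <;>
      subst ha hca hb hcb
    · simp [giLoop, giA, PySem.Set.len, h0]
    · simp [giLoop, giA, PySem.Set.len, hS]
    · simp [giLoop, giA, PySem.Set.len, hS, natCast_beq_one]
  | cons ch rest ih =>
    intro p a ca b cb H
    rcases H with ⟨h0, ha, hca, hb, hcb⟩ | ⟨x, hS, ha, hca, hb, hcb⟩ | ⟨x, y, hS, ha, hca, hb, hcb⟩ <;>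
      subst ha hca hb hcb
    · -- no chars seen yet: take the a-is-None branch
      have hchp : ch ∉ p := fun hm => by simpa [h0] using (PySem.Set.mem_ofList (y := ch) (xs := p)).2 hm
      have hstep : giLoop (ch :: rest) none 0 none 0 = giLoop rest (some ch) 1 none 0 := by
        simp [giLoop]
      rw [hstep, show p ++ ch :: rest = (p ++ [ch]) ++ rest by simp]
      apply ih
      refine Or.inr (Or.inl ⟨ch, ?_, rfl, ?_, rfl, rfl⟩)
      · rw [PySem.Set.ofList_append_singleton, h0]; rfl
      · simp [List.count_append, List.count_eq_zero.2 hchp]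
    · -- one distinct char seen so far
      by_cases hchx : ch = x
      · subst hchx
        have hstep : giLoop (ch :: rest) (some ch) (↑(p.count ch)) none 0
            = giLoop rest (some ch) (↑(p.count ch) + 1) none 0 := by simp [giLoop]
        rw [hstep, show p ++ ch :: rest = (p ++ [ch]) ++ rest by simp]
        apply ih
        refine Or.inr (Or.inl ⟨ch, ?_, rfl, ?_, rfl, rfl⟩)
        · rw [PySem.Set.ofList_append_singleton, hS, PySem.Set.add_of_mem (by simp)]
        · simp [List.count_append]
      · have hchp : ch ∉ p := fun hm => hchx (by simpa [hS] using (PySem.Set.mem_ofList (y := ch) (xs := p)).2 hm)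
        have hstep : giLoop (ch :: rest) (some x) (↑(p.count x)) none 0
            = giLoop rest (some x) (↑(p.count x)) (some ch) 1 := by simp [giLoop, hchx]
        rw [hstep, show p ++ ch :: rest = (p ++ [ch]) ++ rest by simp]
        apply ih
        refine Or.inr (Or.inr ⟨x, ch, ?_, rfl, ?_, rfl, ?_⟩)
        · rw [PySem.Set.ofList_append_singleton, hS, PySem.Set.add_of_not_mem (by simp [hchx])]
          rfl
        · simp [List.count_append, hchx]
        · simp [List.count_append, List.count_eq_zero.2 hchp]
    · -- two distinct chars seen so far
      have hxy : x ≠ y := by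
        have h := PySem.Set.nodup_ofList p
        rw [hS] at h
        intro he
        subst he
        simp at h
      by_cases hchx : ch = x
      · subst hchx
        have hstep : giLoop (ch :: rest) (some ch) (↑(p.count ch)) (some y) (↑(p.count y))
            = giLoop rest (some ch) (↑(p.count ch) + 1) (some y) (↑(p.count y)) := by simp [giLoop]
        rw [hstep, show p ++ ch :: rest = (p ++ [ch]) ++ rest by simp]
        apply ih
        refine Or.inr (Or.inr ⟨ch, y, ?_, rfl, ?_, rfl, ?_⟩)
        · rw [PySem.Set.ofList_append_singleton, hS, PySem.Set.add_of_mem (by simp)]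
        · simp [List.count_append]
        · simp [List.count_append, hxy]
      · by_cases hchy : ch = y
        · subst hchy
          have hstep : giLoop (ch :: rest) (some x) (↑(p.count x)) (some ch) (↑(p.count ch))
              = giLoop rest (some x) (↑(p.count x)) (some ch) (↑(p.count ch) + 1) := by simp [giLoop, hchx]
          rw [hstep, show p ++ ch :: rest = (p ++ [ch]) ++ rest by simp]
          apply ih
          refine Or.inr (Or.inr ⟨x, ch, ?_, rfl, ?_, rfl, ?_⟩)
          · rw [PySem.Set.ofList_append_singleton, hS, PySem.Set.add_of_mem (by simp)]
          · simp [List.count_append, hchx]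
          · simp [List.count_append]
        · -- a third distinct char: the loop returns False, and A has ≥ 3 distinct chars
          have hstep : giLoop (ch :: rest) (some x) (↑(p.count x)) (some y) (↑(p.count y)) = false := by
            simp [giLoop, hchx, hchy]
          rw [hstep]
          have hx : x ∈ p := (PySem.Set.mem_ofList (y := x) (xs := p)).1 (by rw [hS]; simp)
          have hy : y ∈ p := (PySem.Set.mem_ofList (y := y) (xs := p)).1 (by rw [hS]; simp)
          exact (giA_of_three (s := p ++ ch :: rest)
            (by simp [hx]) (by simp [hy]) (by simp)
            hxy (fun h => hchx h.symm) (fun h => hchy h.symm)).symm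

-- ===== VERDICT (by name: the statement is the Claim_ definition above) =====
theorem get_interesting_number_spec : Claim_equal_get_interesting_number := by
  intro num _
  unfold Spec_get_interesting_number get_interesting_number get_interesting_number_alt
  have h := giLoop_inv (PySem.Int.toChars num) [] none 0 none 0 (Or.inl ⟨rfl, rfl, rfl, rfl, rfl⟩)
  simpa [giA] using h.symm
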